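-- pv_equiv track=rewrite | github.com/themoddedcube/global-functional-resynthesis | solver.py | _compute_pprm
-- ===== SOURCE A (Python) =====
-- def _compute_pprm(truth_table_bits: int, n: int) -> list[int]:
--     """Compute PPRM coefficients via butterfly (Reed-Muller transform)."""
--     size = 1 << n
--     coeffs = [(truth_table_bits >> i) & 1 for i in range(size)]
--     for i in range(n):
--         step = 1 << i
--         for j in range(0, size, step * 2):
--             for k in range(step):
--                 coeffs[j + k + step] ^= coeffs[j + k]
--     return coeffs
-- ===== SOURCE B (Python) =====
-- def _compute_pprm(truth_table_bits: int, n: int) -> list[int]: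
--     """Compute PPRM coefficients by divide-and-conquer (recursive Reed-Muller transform)."""
--     def rec(v: list[int]) -> list[int]:
--         if len(v) <= 1:
--             return v
--         h = len(v) // 2
--         a = rec(v[:h])
--         b = rec(v[h:])
--         return a + [x ^ y for x, y in zip(a, b)]
--     return rec([(truth_table_bits >> i) & 1 for i in range(1 << n)])
-- ===== Notes on version B (the rewrite author's own statement) =====
-- stated objective: simpler
-- what changed: Replaces the three nested index loops mutating coeffs in place (butterfly over stages i, blocks j, offsets k) by a recursive divide-and-conquer: transform each half and append the lower half's transform with the pointwise XOR of the two halves' transforms; no in-place state, no index arithmetic.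
import Mathlib
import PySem

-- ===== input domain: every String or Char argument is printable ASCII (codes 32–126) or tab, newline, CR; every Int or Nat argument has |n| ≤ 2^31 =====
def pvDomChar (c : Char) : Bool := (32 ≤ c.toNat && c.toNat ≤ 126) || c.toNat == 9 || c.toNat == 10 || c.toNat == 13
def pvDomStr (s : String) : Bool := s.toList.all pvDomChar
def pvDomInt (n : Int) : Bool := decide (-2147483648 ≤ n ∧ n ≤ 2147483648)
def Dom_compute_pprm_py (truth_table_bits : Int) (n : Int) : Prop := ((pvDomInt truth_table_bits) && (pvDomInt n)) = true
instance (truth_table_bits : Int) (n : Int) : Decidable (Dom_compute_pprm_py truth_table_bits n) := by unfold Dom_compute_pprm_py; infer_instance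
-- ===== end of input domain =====

-- B replaces A's in-place three-loop butterfly by a recursive divide-and-conquer Reed-Muller
-- transform (transform each half, append lower-half transform and pointwise XOR of the two
-- halves' transforms); objective: simpler, same asymptotic cost.

-- ===== PORT A =====
-- innermost loop of A: for k in range(step): coeffs[j+k+step] ^= coeffs[j+k]
-- (all indices are provably in range, so pyGetD/pySetD are exact here)
def pvInnerK (step j : Int) (c : List Int) : List Int :=
  (PySem.List.pyRange 0 step 1).foldl
    (fun c k => PySem.List.pySetD c (j + k + step)
      (PySem.Int.bxor (PySem.List.pyGetD c (j + k + step) 0) (PySem.List.pyGetD c (j + k) 0))) c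

-- middle loop of A: for j in range(0, size, step*2)
def pvStageJ (size step : Int) (c : List Int) : List Int :=
  (PySem.List.pyRange 0 size (step * 2)).foldl (fun c j => pvInnerK step j c) c

-- Python's `1 << n` / `1 << i` have nonnegative exponents under Pre_, so `.toNat` is exact
def compute_pprm_py (truth_table_bits : Int) (n : Int) : List Int :=
  let size : Int := 1 <<< n.toNat
  let coeffs : List Int :=
    (PySem.List.pyRange 0 size 1).map (fun i => PySem.Int.band (truth_table_bits >>> i.toNat) 1)
  (PySem.List.pyRange 0 n 1).foldl (fun c i => pvStageJ size (1 <<< i.toNat) c) coeffs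

-- ===== PORT B =====
-- B's helper `rec`; the slices v[:h] / v[h:] with 0 ≤ h ≤ len(v) are exactly take/drop
def pvRec (v : List Int) : List Int :=
  if _h : v.length ≤ 1 then v
  else
    let m := v.length / 2
    let a := pvRec (v.take m)
    let b := pvRec (v.drop m)
    a ++ List.zipWith (fun x y => PySem.Int.bxor x y) a b
termination_by v.length
decreasing_by
  · simp only [List.length_take]; omega
  · simp only [List.length_drop]; omega

def compute_pprm_py_alt (truth_table_bits : Int) (n : Int) : List Int :=
  pvRec ((PySem.List.pyRange 0 (1 <<< n.toNat) 1).map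
    (fun i => PySem.Int.band (truth_table_bits >>> i.toNat) 1))

-- ===== PRECONDITION & SPEC =====
-- Python A raises ValueError ("negative shift count") on n < 0; Pre_ excludes exactly that.
def Pre_compute_pprm_py (truth_table_bits : Int) (n : Int) : Prop := 0 ≤ n
instance (truth_table_bits : Int) (n : Int) : Decidable (Pre_compute_pprm_py truth_table_bits n) := by
  unfold Pre_compute_pprm_py; infer_instance

def pvWitness_compute_pprm_py : Int × Int := (11, 2)

def Spec_compute_pprm_py (truth_table_bits : Int) (n : Int) (out : List Int) : Prop := out = compute_pprm_py_alt truth_table_bits n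
instance (truth_table_bits : Int) (n : Int) (out : List Int) : Decidable (Spec_compute_pprm_py truth_table_bits n out) := by unfold Spec_compute_pprm_py; infer_instance

-- ===== CLAIM (what is proved, stated in full; the proofs are below) =====
def Claim_equal_compute_pprm_py : Prop := ∀ (truth_table_bits : Int) (n : Int), Dom_compute_pprm_py truth_table_bits n → Pre_compute_pprm_py truth_table_bits n → Spec_compute_pprm_py truth_table_bits n (compute_pprm_py truth_table_bits n)

-- ===== LEMMAS AND PROOFS =====

-- Nat-indexed form of A's innermost loop body
def natBody (j0 s0 : Nat) (c : List Int) (k : Nat) : List Int :=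
  c.set (j0 + k + s0) (PySem.Int.bxor (c.getD (j0 + k + s0) 0) (c.getD (j0 + k) 0))

def natInner (j0 s0 : Nat) (c : List Int) : List Int := (List.range s0).foldl (natBody j0 s0) c

-- what one j-block stage does, block by block
def blockMap (s : Nat) : Nat → List Int → List Int
  | 0, c => c
  | nb+1, c =>
      c.take s ++ List.zipWith PySem.Int.bxor ((c.drop s).take s) (c.take s)
        ++ blockMap s nb (c.drop (2*s))

theorem getD_concat (a b : List Int) (i : Nat) :
    (a ++ b).getD (a.length + i) 0 = b.getD i 0 := by
  rw [List.getD_append_right _ _ _ _ (by omega)]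
  congr 1
  omega

theorem getD_concat_lt (a b : List Int) (i : Nat) (h : i < a.length) :
    (a ++ b).getD i 0 = a.getD i 0 := by
  rw [List.getD_append _ _ _ _ h]

theorem set_concat (a b : List Int) (i : Nat) (v : Int) :
    (a ++ b).set (a.length + i) v = a ++ b.set i v := by
  rw [List.set_append, if_neg (by omega)]
  congr 2
  omega

theorem convInner (s0 j0 : Nat) (c : List Int) :
    pvInnerK (s0 : Int) (j0 : Int) c = natInner j0 s0 c := by
  unfold pvInnerK natInner
  rw [PySem.List.pyRange_zero_natCast, List.foldl_map]
  congr 1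
  funext c k
  have h1 : ((j0:Int) + (k:Int) + (s0:Int)) = ((j0 + k + s0 : Nat) : Int) := by push_cast; ring
  have h2 : ((j0:Int) + (k:Int)) = ((j0 + k : Nat) : Int) := by push_cast; ring
  rw [h1, h2, PySem.List.pySetD_natCast, PySem.List.pyGetD_natCast, PySem.List.pyGetD_natCast]
  rfl

theorem innerG (s0 : Nat) (l : List Int) (hl : l.length = s0) :
    ∀ (cnt k0 : Nat) (pre d r rest : List Int), d.length = k0 → r.length = cnt → k0 + cnt = s0 →
      (List.range' k0 cnt).foldl (natBody pre.length s0) (pre ++ (l ++ (d ++ (r ++ rest))))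
        = pre ++ (l ++ (d ++ (List.zipWith PySem.Int.bxor r (l.drop k0) ++ rest))) := by
  intro cnt
  induction cnt with
  | zero =>
      intro k0 pre d r rest hd hr hks
      have hre : r = [] := List.length_eq_zero_iff.mp hr
      subst hre
      simp
  | succ m ih =>
      intro k0 pre d r rest hd hr hks
      obtain ⟨y, r', rfl⟩ : ∃ y r', r = y :: r' := by
        cases r with
        | nil => simp at hr
        | cons y r' => exact ⟨y, r', rfl⟩
      simp only [List.length_cons] at hr
      have hk0 : k0 < l.length := by omega
      rw [List.range'_succ, List.foldl_cons]
      have hidx1 : pre.length + k0 + s0 = pre.length + (l.length + (d.length + 0)) := by omega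
      have hnest : (y : Int) :: r' ++ rest = y :: (r' ++ rest) := by simp
      have hget1 : (pre ++ (l ++ (d ++ (y :: r' ++ rest)))).getD (pre.length + k0 + s0) 0 = y := by
        rw [hnest, hidx1, getD_concat, getD_concat, getD_concat]
        rfl
      have hget2 : (pre ++ (l ++ (d ++ (y :: r' ++ rest)))).getD (pre.length + k0) 0 = l.getD k0 0 := by
        rw [getD_concat, getD_concat_lt _ _ _ hk0]
      have hset : natBody pre.length s0 (pre ++ (l ++ (d ++ (y :: r' ++ rest)))) k0
          = pre ++ (l ++ ((d ++ [PySem.Int.bxor y (l.getD k0 0)]) ++ (r' ++ rest))) := by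
        unfold natBody
        rw [hget1, hget2, hnest, hidx1, set_concat, set_concat, set_concat]
        simp [List.append_assoc]
      rw [hset, ih (k0+1) pre (d ++ [PySem.Int.bxor y (l.getD k0 0)]) r' rest
        (by simp [hd]) (by omega) (by omega)]
      rw [List.getD_eq_getElem l 0 hk0, List.drop_eq_getElem_cons hk0, List.zipWith_cons_cons]
      simp [List.append_assoc]

theorem innerFull (s0 : Nat) (pre l r rest : List Int) (hl : l.length = s0) (hr : r.length = s0) :
    natInner pre.length s0 (pre ++ (l ++ (r ++ rest)))
      = pre ++ (l ++ (List.zipWith PySem.Int.bxor r l ++ rest)) := by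
  have h := innerG s0 l hl s0 0 pre [] r rest rfl hr (by omega)
  unfold natInner
  rw [List.range_eq_range']
  simpa using h

theorem stageG (s0 : Nat) (hs : 0 < s0) :
    ∀ (nb k0 : Nat) (pre c : List Int), pre.length = k0 * (2*s0) → c.length = nb * (2*s0) →
      (List.range' k0 nb).foldl (fun c b => natInner (b*(2*s0)) s0 c) (pre ++ c)
        = pre ++ blockMap s0 nb c := by
  intro nb
  induction nb with
  | zero =>
      intro k0 pre c hp hc
      have : c = [] := List.length_eq_zero_iff.mp (by omega)
      subst this
      simp [blockMap]
  | succ m ih =>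
      intro k0 pre c hp hc
      have hexp : (m+1)*(2*s0) = m*(2*s0) + 2*s0 := by ring
      have hexp2 : (k0+1)*(2*s0) = k0*(2*s0) + 2*s0 := by ring
      have hcl : 2*s0 ≤ c.length := by omega
      rw [List.range'_succ, List.foldl_cons]
      have hlen_l : (c.take s0).length = s0 := by rw [List.length_take]; omega
      have hlen_r : ((c.drop s0).take s0).length = s0 := by
        rw [List.length_take, List.length_drop]; omega
      have hsplit : c = c.take s0 ++ ((c.drop s0).take s0 ++ c.drop (2*s0)) := by
        conv_lhs => rw [← List.take_append_drop s0 c]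
        congr 1
        conv_lhs => rw [← List.take_append_drop s0 (c.drop s0)]
        congr 1
        rw [List.drop_drop]
        congr 1
        omega
      have h1 : natInner (k0*(2*s0)) s0 (pre ++ c)
          = pre ++ (c.take s0 ++ (List.zipWith PySem.Int.bxor ((c.drop s0).take s0) (c.take s0) ++ c.drop (2*s0))) := by
        conv_lhs => rw [hsplit, ← hp]
        exact innerFull s0 pre _ _ _ hlen_l hlen_r
      rw [h1]
      have hzlen : (List.zipWith PySem.Int.bxor ((c.drop s0).take s0) (c.take s0)).length = s0 := by
        rw [List.length_zipWith, hlen_l, hlen_r]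
        omega
      have hre : pre ++ (c.take s0 ++ (List.zipWith PySem.Int.bxor ((c.drop s0).take s0) (c.take s0) ++ c.drop (2*s0)))
          = (pre ++ c.take s0 ++ List.zipWith PySem.Int.bxor ((c.drop s0).take s0) (c.take s0)) ++ c.drop (2*s0) := by
        simp [List.append_assoc]
      rw [hre]
      have hplen : (pre ++ c.take s0 ++ List.zipWith PySem.Int.bxor ((c.drop s0).take s0) (c.take s0)).length
          = (k0+1) * (2*s0) := by
        simp only [List.length_append, hp, hlen_l, hzlen]
        omega
      have hc2len : (c.drop (2*s0)).length = m * (2*s0) := by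
        rw [List.length_drop]; omega
      rw [ih (k0+1) _ _ hplen hc2len, blockMap]
      simp [List.append_assoc]

theorem blockMap_length (s : Nat) (_hs : 0 < s) :
    ∀ (nb : Nat) (c : List Int), c.length = nb*(2*s) → (blockMap s nb c).length = c.length := by
  intro nb
  induction nb with
  | zero => intro c hc; rfl
  | succ m ih =>
      intro c hc
      have hexp : (m+1)*(2*s) = m*(2*s) + 2*s := by ring
      have hcl : 2*s ≤ c.length := by omega
      rw [blockMap]
      have hdl : (c.drop (2*s)).length = m*(2*s) := by rw [List.length_drop]; omega
      have hrec := ih _ hdl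
      simp only [List.length_append, List.length_take, List.length_zipWith, List.length_drop,
        hrec, hdl]
      omega

theorem blockMap_append (s : Nat) (_hs : 0 < s) :
    ∀ (nb mb : Nat) (a b : List Int), a.length = nb*(2*s) →
      blockMap s (nb + mb) (a ++ b) = blockMap s nb a ++ blockMap s mb b := by
  intro nb
  induction nb with
  | zero =>
      intro mb a b ha
      have : a = [] := List.length_eq_zero_iff.mp (by omega)
      subst this
      simp [blockMap]
  | succ m ih =>
      intro mb a b ha
      have hexp : (m+1)*(2*s) = m*(2*s) + 2*s := by ring
      have hal : 2*s ≤ a.length := by omega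
      have hsm : m + 1 + mb = (m + mb) + 1 := by omega
      rw [hsm, blockMap, blockMap]
      have ht : (a ++ b).take s = a.take s := List.take_append_of_le_length (by omega)
      have hd : (a ++ b).drop s = a.drop s ++ b := List.drop_append_of_le_length (by omega)
      have ht2 : ((a ++ b).drop s).take s = (a.drop s).take s := by
        rw [hd]
        exact List.take_append_of_le_length (by rw [List.length_drop]; omega)
      have hd2 : (a ++ b).drop (2*s) = a.drop (2*s) ++ b := List.drop_append_of_le_length (by omega)
      rw [ht, ht2, hd2, ih mb _ b (by rw [List.length_drop]; omega)]
      simp [List.append_assoc]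

theorem pow_split (m i : Nat) (h : i < m) : 2^(m-1-i) * (2*2^i) = 2^m := by
  have h1 : (2:Nat)*2^i = 2^(i+1) := by rw [pow_succ]; ring
  rw [h1, ← pow_add]
  congr 1
  omega

theorem foldSplit (m : Nat) :
    ∀ (l : List Nat) (a b : List Int), (∀ i ∈ l, i < m) → a.length = 2^m → b.length = 2^m →
      l.foldl (fun c i => blockMap (2^i) (2^(m-i)) c) (a ++ b)
        = l.foldl (fun c i => blockMap (2^i) (2^(m-1-i)) c) a
          ++ l.foldl (fun c i => blockMap (2^i) (2^(m-1-i)) c) b := by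
  intro l
  induction l with
  | nil => intro a b _ _ _; rfl
  | cons i t ih =>
      intro a b hmem ha hb
      have him : i < m := hmem i (by simp)
      have hcnt : 2^(m-i) = 2^(m-1-i) + 2^(m-1-i) := by
        have h1 : m - i = (m-1-i) + 1 := by omega
        rw [h1, pow_succ]
        omega
      have hpos : 0 < (2:Nat)^i := pow_pos (by omega) i
      have ha' : a.length = 2^(m-1-i) * (2*2^i) := by rw [ha, pow_split m i him]
      have hb' : b.length = 2^(m-1-i) * (2*2^i) := by rw [hb, pow_split m i him]
      rw [List.foldl_cons, List.foldl_cons, List.foldl_cons, hcnt,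
        blockMap_append (2^i) hpos _ _ a b ha']
      exact ih _ _ (fun j hj => hmem j (by simp [hj]))
        (by rw [blockMap_length (2^i) hpos _ a ha', ha])
        (by rw [blockMap_length (2^i) hpos _ b hb', hb])

theorem pvRec_length_pow : ∀ (m : Nat) (v : List Int), v.length = 2^m → (pvRec v).length = 2^m := by
  intro m
  induction m with
  | zero =>
      intro v hv
      rw [pvRec, dif_pos (by omega)]
      exact hv
  | succ m ih =>
      intro v hv
      have h2m : (0:Nat) < 2^m := pow_pos (by omega) m
      have hvlen : v.length = 2^m * 2 := by rw [hv, pow_succ]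
      rw [pvRec, dif_neg (by omega)]
      have h1 : (v.take (v.length/2)).length = 2^m := by rw [List.length_take]; omega
      have h2 : (v.drop (v.length/2)).length = 2^m := by rw [List.length_drop]; omega
      have i1 := ih _ h1
      have i2 := ih _ h2
      simp only [List.length_append, List.length_zipWith, i1, i2, Nat.min_self]
      have := pow_succ 2 m
      omega

theorem stagesEq : ∀ (m : Nat) (v : List Int), v.length = 2^m →
    (List.range m).foldl (fun c i => blockMap (2^i) (2^(m-1-i)) c) v = pvRec v := by
  intro m
  induction m with
  | zero =>
      intro v hv
      simp [pvRec, hv]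
  | succ m ih =>
      intro v hv
      have h2m : (0:Nat) < 2^m := pow_pos (by omega) m
      have hvlen : v.length = 2^m * 2 := by rw [hv, pow_succ]
      have ha : (v.take (2^m)).length = 2^m := by rw [List.length_take]; omega
      have hb : (v.drop (2^m)).length = 2^m := by rw [List.length_drop]; omega
      rw [List.range_succ, List.foldl_append, List.foldl_cons, List.foldl_nil]
      have hsub : ∀ (c : List Int) (i : Nat), blockMap (2^i) (2^(m+1-1-i)) c = blockMap (2^i) (2^(m-i)) c := by
        intro c i
        have hx : m + 1 - 1 - i = m - i := by omega
        rw [hx]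
      simp only [hsub]
      conv_lhs => rw [← List.take_append_drop (2^m) v]
      rw [foldSplit m (List.range m) _ _ (by simp) ha hb]
      rw [ih _ ha, ih _ hb]
      simp only [Nat.sub_self, pow_zero]
      have hbm : blockMap (2^m) 1 (pvRec (v.take (2^m)) ++ pvRec (v.drop (2^m)))
          = (pvRec (v.take (2^m)) ++ pvRec (v.drop (2^m))).take (2^m)
            ++ List.zipWith PySem.Int.bxor
              (((pvRec (v.take (2^m)) ++ pvRec (v.drop (2^m))).drop (2^m)).take (2^m))
              ((pvRec (v.take (2^m)) ++ pvRec (v.drop (2^m))).take (2^m))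
            ++ blockMap (2^m) 0 ((pvRec (v.take (2^m)) ++ pvRec (v.drop (2^m))).drop (2*2^m)) := rfl
      rw [hbm]
      have hra : (pvRec (v.take (2^m))).length = 2^m := pvRec_length_pow m _ ha
      have hrb : (pvRec (v.drop (2^m))).length = 2^m := pvRec_length_pow m _ hb
      have ht : (pvRec (v.take (2^m)) ++ pvRec (v.drop (2^m))).take (2^m) = pvRec (v.take (2^m)) := by
        rw [List.take_append_of_le_length (le_of_eq hra.symm)]
        exact List.take_of_length_le (le_of_eq hra)
      have hd : (pvRec (v.take (2^m)) ++ pvRec (v.drop (2^m))).drop (2^m) = pvRec (v.drop (2^m)) := by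
        rw [List.drop_append_of_le_length (le_of_eq hra.symm)]
        rw [List.drop_eq_nil_of_le (le_of_eq hra), List.nil_append]
      have hd2 : (pvRec (v.take (2^m)) ++ pvRec (v.drop (2^m))).drop (2*2^m) = [] := by
        apply List.drop_eq_nil_of_le
        rw [List.length_append, hra, hrb]
        omega
      rw [ht, hd, hd2, List.take_of_length_le (le_of_eq hrb)]
      simp only [blockMap]
      conv_rhs => rw [pvRec]
      rw [dif_neg (by rw [hvlen]; omega)]
      have hhalf : v.length / 2 = 2^m := by rw [hvlen]; omega
      simp only [hhalf]
      rw [List.zipWith_comm_of_comm (fun a b => PySem.Int.bxor_comm a b)]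
      simp

theorem convStage (s0 nb sz : Nat) (hs : 0 < s0) (hsz : sz = nb * (2*s0)) (c : List Int)
    (hc : c.length = sz) :
    pvStageJ ((sz : Nat) : Int) ((s0 : Nat) : Int) c = blockMap s0 nb c := by
  subst hsz
  unfold pvStageJ
  have hstep : ((s0:Int) * 2) = ((2*s0 : Nat) : Int) := by push_cast; ring
  have hspos : (0:Int) < ((2*s0 : Nat) : Int) := by exact_mod_cast Nat.mul_pos (by omega) hs
  rw [hstep, PySem.List.pyRange_of_pos 0 _ hspos]
  have hcount : (if (0:Int) < ((nb*(2*s0) : Nat):Int)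
      then ((((nb*(2*s0):Nat):Int) - 0 + ((2*s0:Nat):Int) - 1)/((2*s0:Nat):Int)).toNat else 0) = nb := by
    by_cases hnb : nb = 0
    · subst hnb; simp
    · rw [if_pos (by exact_mod_cast Nat.mul_pos (Nat.pos_of_ne_zero hnb) (Nat.mul_pos (by omega) hs))]
      have h1 : (((nb*(2*s0):Nat):Int) - 0 + ((2*s0:Nat):Int) - 1)
          = ((nb*(2*s0) + 2*s0 - 1 : Nat) : Int) := by
        have := Nat.mul_pos (by omega : (0:Nat) < 2) hs
        omega
      rw [h1, ← Int.natCast_div, Int.toNat_natCast]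
      have h2 : nb*(2*s0) + 2*s0 - 1 = (2*s0 - 1) + nb*(2*s0) := by omega
      rw [h2, Nat.add_mul_div_right _ _ (by omega : (0:Nat) < 2*s0),
        Nat.div_eq_of_lt (by omega)]
      omega
  rw [hcount, List.foldl_map]
  have hbody : (fun (c : List Int) (k : Nat) => pvInnerK ((s0:Nat):Int) ((0:Int) + ((2*s0:Nat):Int) * (k:Int)) c)
      = fun c k => natInner (k*(2*s0)) s0 c := by
    funext c k
    have hidx : ((0:Int) + ((2*s0:Nat):Int) * (k:Int)) = ((k*(2*s0) : Nat) : Int) := by push_cast; ring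
    rw [hidx, convInner]
  rw [hbody]
  have h := stageG s0 hs nb 0 [] c (by simp) hc
  rw [List.range_eq_range']
  simpa using h

theorem chainEq (m : Nat) :
    ∀ (l : List Nat) (c : List Int), (∀ i ∈ l, i < m) → c.length = 2^m →
      l.foldl (fun c k => pvStageJ ((2^m : Nat) : Int) (((2^k : Nat)) : Int) c) c
        = l.foldl (fun c i => blockMap (2^i) (2^(m-1-i)) c) c := by
  intro l
  induction l with
  | nil => intro c _ _; rfl
  | cons i t ih =>
      intro c hmem hc
      have him : i < m := hmem i (by simp)
      have hpos : 0 < (2:Nat)^i := pow_pos (by omega) i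
      have hfac : (2:Nat)^m = 2^(m-1-i) * (2*2^i) := (pow_split m i him).symm
      rw [List.foldl_cons, List.foldl_cons,
        convStage (2^i) (2^(m-1-i)) (2^m) hpos hfac c hc]
      exact ih _ (fun j hj => hmem j (by simp [hj]))
        (by rw [blockMap_length (2^i) hpos _ c (by rw [hc, hfac]), hc])

theorem finalEq (m : Nat) (c : List Int) (hc : c.length = 2^m) :
    List.foldl (fun c k => pvStageJ ((2^m : Nat) : Int) (((2^k : Nat)) : Int) c) c (List.range m)
      = pvRec c := by
  rw [chainEq m (List.range m) c (by simp) hc]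
  exact stagesEq m c hc

-- ===== VERDICT (by name: the statement is the Claim_ definition above) =====
theorem compute_pprm_py_spec : Claim_equal_compute_pprm_py := by
  intro tt n _ hpre
  obtain ⟨m, rfl⟩ := Int.eq_ofNat_of_zero_le hpre
  show compute_pprm_py tt m = compute_pprm_py_alt tt m
  unfold compute_pprm_py compute_pprm_py_alt
  simp only [Int.toNat_natCast, Nat.one_shiftLeft]
  rw [PySem.List.pyRange_zero_natCast m, List.foldl_map]
  simp only [Int.toNat_natCast]
  exact finalEq m _ (by rw [PySem.List.pyRange_zero_natCast]; simp)
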